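-- pv_equiv track=rewrite | github.com/victorhugochrisosthemos/beecrowd | nao_aceito-b2976.py | max_non_consecutive_triangle_subsequence
-- ===== SOURCE A (Python) =====
-- from itertools import combinations
--
-- def max_non_consecutive_triangle_subsequence(arr):
--     n = len(arr)
--     max_len = 0
--
--     for size in range(3, n + 1):
--         for subset in combinations(arr, size):
--             valid = all(sorted(triple)[0] + sorted(triple)[1] > sorted(triple)[2]
--                         for triple in combinations(subset, 3))
--             if valid:
--                 max_len = max(max_len, len(subset))
--     return max_len
-- ===== SOURCE B (Python) =====
-- def max_non_consecutive_triangle_subsequence(arr):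
--     # Sort once; a multiset is all-triples-triangular iff its two smallest
--     # elements sum to more than its largest, so the answer is the longest
--     # window s[i..j] of the sorted array with s[i] + s[i+1] > s[j].
--     s = sorted(arr)
--     best = 0
--     for j in range(2, len(s)):
--         for i in range(j - 1):
--             if s[i] + s[i + 1] > s[j]:
--                 best = max(best, j - i + 1)
--     return best
-- ===== Notes on version B (the rewrite author's own statement) =====
-- stated objective: faster
-- what changed: Replaced the exponential enumeration of all subsets (checking every triple of every subset) by sort-then-window: a subset is all-triples-triangular iff the two smallest elements of its sorted form sum to more than its largest, so the answer is the longest window s[i..j] of the sorted array with s[i]+s[i+1] > s[j].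
import Mathlib
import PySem

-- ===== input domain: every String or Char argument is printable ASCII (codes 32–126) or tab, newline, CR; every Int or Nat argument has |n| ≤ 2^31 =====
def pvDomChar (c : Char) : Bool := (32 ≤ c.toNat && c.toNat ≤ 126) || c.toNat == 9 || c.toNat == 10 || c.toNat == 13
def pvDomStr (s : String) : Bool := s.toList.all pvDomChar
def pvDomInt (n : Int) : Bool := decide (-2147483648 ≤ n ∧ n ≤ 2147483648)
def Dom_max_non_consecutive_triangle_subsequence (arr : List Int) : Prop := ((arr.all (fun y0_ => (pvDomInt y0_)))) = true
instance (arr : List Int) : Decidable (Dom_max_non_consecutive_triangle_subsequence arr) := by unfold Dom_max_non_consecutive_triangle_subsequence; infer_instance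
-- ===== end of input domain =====

-- B replaces A's exponential enumeration of all subsets by sort-then-window:
-- a multiset is all-triples-triangular iff its two smallest elements sum to
-- more than its largest, so the answer is the longest window s[i..j] of the
-- sorted array with s[i] + s[i+1] > s[j].

-- ===== PORT A =====
-- inner condition of A's generator: sorted(triple)[0] + sorted(triple)[1] > sorted(triple)[2];
-- every triple drawn from combinations(subset, 3) has length 3, so the sorted
-- triple has exactly three elements and the wildcard branch is unreachable.
def pvTriOK (t : List Int) : Bool :=
  match PySem.List.sorted t (fun x => x) with
  | [a, b, c] => decide (a + b > c)
  | _ => true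

def max_non_consecutive_triangle_subsequence (arr : List Int) : Int :=
  let n : Int := arr.length
  (PySem.List.pyRange 3 (n + 1)).foldl
    (fun maxLen size =>
      (PySem.List.combinations arr size.toNat).foldl
        (fun maxLen subset =>
          if (PySem.List.combinations subset 3).all pvTriOK then
            max maxLen (subset.length : Int)
          else maxLen)
        maxLen)
    0

-- ===== PORT B =====
def max_non_consecutive_triangle_subsequence_alt (arr : List Int) : Int :=
  let s := PySem.List.sorted arr (fun x => x)
  (PySem.List.pyRange 2 (s.length : Int)).foldl
    (fun best j =>
      (PySem.List.pyRange 0 (j - 1)).foldl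
        (fun best i =>
          if PySem.List.pyGetD s i 0 + PySem.List.pyGetD s (i + 1) 0 > PySem.List.pyGetD s j 0 then
            max best (j - i + 1)
          else best)
        best)
    0

-- ===== PRECONDITION & SPEC =====
def Spec_max_non_consecutive_triangle_subsequence (arr : List Int) (out : Int) : Prop := out = max_non_consecutive_triangle_subsequence_alt arr
instance (arr : List Int) (out : Int) : Decidable (Spec_max_non_consecutive_triangle_subsequence arr out) := by unfold Spec_max_non_consecutive_triangle_subsequence; infer_instance

-- ===== CLAIM (what is proved, stated in full; the proofs are below) =====
def Claim_equal_max_non_consecutive_triangle_subsequence : Prop := ∀ (arr : List Int), Dom_max_non_consecutive_triangle_subsequence arr → Spec_max_non_consecutive_triangle_subsequence arr (max_non_consecutive_triangle_subsequence arr)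

-- ===== LEMMAS AND PROOFS =====

-- A's validity test for a candidate subset
def pvValid (s : List Int) : Bool := (PySem.List.combinations s 3).all pvTriOK

-- B's window test on the sorted list
def pvCondB (s : List Int) (j i : Int) : Bool :=
  PySem.List.pyGetD s i 0 + PySem.List.pyGetD s (i + 1) 0 > PySem.List.pyGetD s j 0

-- all candidate values A's loop maxes over
def pvCandA (arr : List Int) : List Int :=
  (PySem.List.pyRange 3 ((arr.length : Int) + 1)).flatMap
    (fun size => ((PySem.List.combinations arr size.toNat).filter pvValid).map
      (fun s => (s.length : Int)))

-- all candidate values B's loop maxes over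
def pvCandB (arr : List Int) : List Int :=
  (PySem.List.pyRange 2 ((PySem.List.sorted arr (fun x => x)).length : Int)).flatMap
    (fun j => ((PySem.List.pyRange 0 (j - 1)).filter
        (fun i => pvCondB (PySem.List.sorted arr (fun x => x)) j i)).map
      (fun i => j - i + 1))

lemma pvFoldNest {α : Type} (l : List α) (g : α → List Int) (a : Int) :
    l.foldl (fun m x => (g x).foldl max m) a = (l.flatMap g).foldl max a := by
  induction l generalizing a with
  | nil => simp
  | cons x xs ih => simp [List.flatMap_cons, List.foldl_append, ih]

lemma pvA_eq (arr : List Int) :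
    max_non_consecutive_triangle_subsequence arr = (pvCandA arr).foldl max 0 := by
  show (PySem.List.pyRange 3 ((arr.length : Int) + 1)).foldl _ 0 = _
  unfold pvCandA
  rw [← pvFoldNest]
  apply PySem.List.foldl_congr_mem
  intro m size _
  rw [PySem.List.foldl_if_eq_foldl_filter
    (fun subset => (PySem.List.combinations subset 3).all pvTriOK)
    (fun m subset => max m (subset.length : Int)), List.foldl_map]
  rfl

lemma pvB_eq (arr : List Int) :
    max_non_consecutive_triangle_subsequence_alt arr = (pvCandB arr).foldl max 0 := by
  show (PySem.List.pyRange 2 ((PySem.List.sorted arr (fun x => x)).length : Int)).foldl _ 0 = _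
  unfold pvCandB
  rw [← pvFoldNest]
  apply PySem.List.foldl_congr_mem
  intro m j _
  rw [PySem.List.foldl_ite_eq_foldl_filter
    (fun i => PySem.List.pyGetD (PySem.List.sorted arr (fun x => x)) i 0 +
      PySem.List.pyGetD (PySem.List.sorted arr (fun x => x)) (i + 1) 0 >
      PySem.List.pyGetD (PySem.List.sorted arr (fun x => x)) j 0)
    (fun m i => max m (j - i + 1)), List.foldl_map]
  rfl

lemma pvFoldMaxLe (xs ys : List Int) (h : ∀ v ∈ xs, ∃ w ∈ ys, v ≤ w) :
    xs.foldl max 0 ≤ ys.foldl max 0 := by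
  rcases PySem.List.foldl_max_mem xs 0 with h0 | hm
  · rw [h0]; exact (PySem.List.le_foldl_max ys 0).1
  · obtain ⟨w, hw, hvw⟩ := h _ hm
    exact le_trans hvw ((PySem.List.le_foldl_max ys 0).2 w hw)

lemma pvTriOK_perm (t t' : List Int) (h : t.Perm t') : pvTriOK t = pvTriOK t' := by
  unfold pvTriOK
  rw [PySem.List.sorted_eq_sorted_of_perm t t' (fun x => x) (fun a b hab => hab) h]

lemma pvTriOK_sorted3 (a b c : Int) (hab : a ≤ b) (hbc : b ≤ c) :
    pvTriOK [a, b, c] = decide (a + b > c) := by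
  unfold pvTriOK
  rw [PySem.List.sorted_eq_self_of_pairwise]
  · refine List.Pairwise.cons ?_ (List.Pairwise.cons ?_ (List.pairwise_singleton _ _))
    · intro x hx
      rcases List.mem_cons.mp hx with rfl | hx
      · exact hab
      · rcases List.mem_singleton.mp hx with rfl
        exact le_trans hab hbc
    · intro x hx
      rcases List.mem_singleton.mp hx with rfl
      exact hbc

lemma pvValid_iff (s : List Int) :
    pvValid s = true ↔ ∀ c : List Int, c.Sublist s → c.length = 3 → pvTriOK c = true := by
  simp only [pvValid, List.all_eq_true, PySem.List.mem_combinations_iff]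
  constructor
  · intro h c hc hl; exact h c ⟨hc, hl⟩
  · intro h c ⟨hc, hl⟩; exact h c hc hl

-- monotone access in a pairwise-≤ list
lemma pvMono (s : List Int) (hp : s.Pairwise (· ≤ ·)) (p q : Nat) (hpq : p ≤ q)
    (hq : q < s.length) : s[p]'(lt_of_le_of_lt (by omega) hq) ≤ s[q] := by
  rcases Nat.lt_or_ge p q with h | h
  · exact List.pairwise_iff_getElem.mp hp p q _ _ h
  · have : p = q := by omega
    subst this; exact le_refl _

lemma pvValid_of_sorted (u : List Int) (hp : u.Pairwise (· ≤ ·)) (h3 : 3 ≤ u.length)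
    (h : u[0]'(by omega) + u[1]'(by omega) > u[u.length - 1]'(by omega)) :
    pvValid u = true := by
  rw [pvValid_iff]
  intro c hc hl
  obtain ⟨is, hceq, hpis⟩ := List.sublist_eq_map_getElem hc
  have hislen : is.length = 3 := by
    have := hl; rw [hceq, List.length_map] at this; exact this
  obtain ⟨i0, i1, i2, rfl⟩ := List.length_eq_three.mp hislen
  have h01 : i0 < i1 := by
    have := List.pairwise_iff_getElem.mp hpis 0 1 (by simp) (by simp) (by omega); simpa using this
  have h12 : i1 < i2 := by
    have := List.pairwise_iff_getElem.mp hpis 1 2 (by simp) (by simp) (by omega); simpa using this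
  subst hceq
  simp only [List.map_cons, List.map_nil, Fin.getElem_fin]
  have hm01 : u[(i0 : Nat)] ≤ u[(i1 : Nat)] := pvMono u hp i0 i1 (by omega) i1.isLt
  have hm12 : u[(i1 : Nat)] ≤ u[(i2 : Nat)] := pvMono u hp i1 i2 (by omega) i2.isLt
  rw [pvTriOK_sorted3 _ _ _ hm01 hm12]
  have hb0 : u[0]'(by omega) ≤ u[(i0 : Nat)] := pvMono u hp 0 i0 (by omega) i0.isLt
  have hb1 : u[1]'(by omega) ≤ u[(i1 : Nat)] := pvMono u hp 1 i1 (by omega) i1.isLt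
  have hb2 : u[(i2 : Nat)] ≤ u[u.length - 1]'(by omega) :=
    pvMono u hp i2 (u.length - 1) (by have := i2.isLt; omega) (by omega)
  simp only [decide_eq_true_eq]
  omega

lemma pvSorted_of_valid (u : List Int) (hp : u.Pairwise (· ≤ ·)) (h3 : 3 ≤ u.length)
    (hv : pvValid u = true) :
    u[0]'(by omega) + u[1]'(by omega) > u[u.length - 1]'(by omega) := by
  match u, h3 with
  | a :: b :: t, h3 =>
  obtain ⟨n, hn⟩ : ∃ n, t.length = n + 1 := by
    refine ⟨t.length - 1, ?_⟩
    have : t ≠ [] := by intro hnil; subst hnil; simp at h3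
    cases t with
    | nil => simp at this
    | cons x xs => simp
  have hnt : n < t.length := by omega
  have hsub : List.Sublist [a, b, t[n]'hnt] (a :: b :: t) :=
    List.Sublist.cons₂ _ (List.Sublist.cons₂ _ (List.singleton_sublist.mpr (List.getElem_mem hnt)))
  have hab : a ≤ b := (List.pairwise_cons.mp hp).1 b (by simp)
  have hbl : b ≤ t[n]'hnt :=
    (List.pairwise_cons.mp (List.pairwise_cons.mp hp).2).1 _ (List.getElem_mem hnt)
  have h1 := (pvValid_iff _).mp hv _ hsub rfl
  rw [pvTriOK_sorted3 _ _ _ hab hbl, decide_eq_true_eq] at h1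
  have hlast : (a :: b :: t)[(a :: b :: t).length - 1]'(by omega) = t[n]'hnt := by
    simp [hn]
  simp only [List.getElem_cons_zero, List.getElem_cons_succ]
  rw [hlast]
  exact h1

lemma pvValid_perm_mp (x y : List Int) (hxy : x.Perm y) (hx : pvValid x = true) :
    pvValid y = true := by
  rw [pvValid_iff] at hx ⊢
  intro c hc hl
  have hsp : c.Subperm x := hc.subperm.trans hxy.symm.subperm
  obtain ⟨c', hpc, hsubc⟩ := hsp
  rw [pvTriOK_perm c c' hpc.symm]
  exact hx c' hsubc (by rw [hpc.length_eq]; exact hl)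

lemma pvValid_perm (s s' : List Int) (h : s.Perm s') :
    (pvValid s = true ↔ pvValid s' = true) :=
  ⟨pvValid_perm_mp s s' h, pvValid_perm_mp s' s h.symm⟩

-- a strictly increasing index list advances at least one per step
lemma pvGap {n : Nat} (is : List (Fin n)) (hp : is.Pairwise (· < ·)) (m d : Nat)
    (hd : m + d < is.length) :
    (is[m]'(by omega) : Nat) + d ≤ (is[m + d]'(hd) : Nat) := by
  induction d with
  | zero => simp
  | succ d ih =>
    have h1 : (is[m]'(by omega) : Nat) + d ≤ (is[m + d]'(by omega) : Nat) := ih (by omega)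
    have h2 : is[m + d]'(by omega) < is[m + (d + 1)]'(by omega) :=
      List.pairwise_iff_getElem.mp hp (m + d) (m + (d + 1)) (by omega) (by omega) (by omega)
    have := Fin.lt_def.mp h2
    omega

-- A-side value comes from a window of the sorted array: subset ⇒ window
lemma pvDirAB (arr : List Int) : ∀ v ∈ pvCandA arr, ∃ w ∈ pvCandB arr, v ≤ w := by
  intro v hv
  unfold pvCandA at hv
  obtain ⟨size, hsize, hvmem⟩ := List.mem_flatMap.mp hv
  obtain ⟨s, hsmem, rfl⟩ := List.mem_map.mp hvmem
  obtain ⟨hscomb, hsval⟩ := List.mem_filter.mp hsmem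
  obtain ⟨hssub, hslen⟩ := (PySem.List.mem_combinations_iff _ _ _).mp hscomb
  obtain ⟨hsz3, hszn⟩ := PySem.List.mem_pyRange_one.mp hsize
  have hk3 : 3 ≤ s.length := by rw [hslen]; omega
  set t := PySem.List.sorted arr (fun x => x) with htdef
  set u := PySem.List.sorted s (fun x => x) with hudef
  have hup : u.Perm s := PySem.List.sorted_perm s (fun x => x) false
  have hvalu : pvValid u = true := (pvValid_perm u s hup).mpr hsval
  have hpt : t.Pairwise (· ≤ ·) := PySem.List.sorted_pairwise arr (fun x => x)
  have hpu : u.Pairwise (· ≤ ·) := PySem.List.sorted_pairwise s (fun x => x)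
  have htp : t.Perm arr := PySem.List.sorted_perm arr (fun x => x) false
  have hsubperm : u.Subperm t := (hup.subperm.trans hssub.subperm).trans htp.symm.subperm
  have hsubl : u.Sublist t := List.sublist_of_subperm_of_pairwise hsubperm hpu hpt
  have hul : u.length = s.length := PySem.List.length_sorted s _ _
  have htl : t.length = arr.length := PySem.List.length_sorted arr _ _
  have hu3 : 3 ≤ u.length := by omega
  have hval012 := pvSorted_of_valid u hpu hu3 hvalu
  obtain ⟨is, hueq, hpis⟩ := List.sublist_eq_map_getElem hsubl
  have hislen : is.length = u.length := by
    have := congrArg List.length hueq; simp at this; omega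
  set k := u.length with hkdef
  have hk1 : k - 1 < is.length := by omega
  set j : Nat := (is[k-1]'hk1 : Fin t.length).val with hjdef
  have hjlt : j < t.length := (is[k-1]'hk1 : Fin t.length).isLt
  have gap0 : ((is[0]'(by omega) : Fin t.length) : Nat) + (k - 1) ≤ j := by
    have h := pvGap is hpis 0 (k-1) (by omega)
    simpa using h
  have gap1 : ((is[1]'(by omega) : Fin t.length) : Nat) + (k - 2) ≤ j := by
    have h := pvGap is hpis 1 (k-2) (by omega)
    simp only [show 1 + (k-2) = k-1 from by omega] at h
    exact h
  set i : Nat := j - (k - 1) with hidef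
  have hjk : k - 1 ≤ j := by omega
  have hpoint : ∀ (m : Nat) (hm : m < k), u[m]'hm =
      t[((is[m]'(by omega) : Fin t.length) : Nat)]'((is[m]'(by omega) : Fin t.length).isLt) := by
    intro m hm
    have hm' : m < is.length := by omega
    rw [List.getElem_of_eq hueq hm]
    simp [Fin.getElem_fin]
  have hb0 : u[0]'(by omega) ≤ t[i]'(by omega) := by
    rw [hpoint 0 (by omega)]
    exact pvMono t hpt _ i (by omega) (by omega)
  have hb1 : u[1]'(by omega) ≤ t[i+1]'(by omega) := by
    rw [hpoint 1 (by omega)]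
    exact pvMono t hpt _ (i+1) (by omega) (by omega)
  have hblast : u[k-1]'(by omega) = t[j]'hjlt := by
    rw [hpoint (k-1) (by omega)]
  have hcond : t[i]'(by omega) + t[i+1]'(by omega) > t[j]'hjlt := by
    have h := hval012
    rw [hblast] at h
    omega
  refine ⟨(j : Int) - (i : Int) + 1, ?_, ?_⟩
  · unfold pvCandB
    rw [← htdef]
    refine List.mem_flatMap.mpr ⟨(j : Int), PySem.List.mem_pyRange_one.mpr ⟨by omega, by omega⟩, ?_⟩
    refine List.mem_map.mpr ⟨(i : Int), List.mem_filter.mpr ⟨?_, ?_⟩, rfl⟩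
    · exact PySem.List.mem_pyRange_one.mpr ⟨by omega, by omega⟩
    · unfold pvCondB
      rw [decide_eq_true_eq]
      rw [PySem.List.pyGetD_eq_getElem t 0 (by omega) (by omega),
          PySem.List.pyGetD_eq_getElem t 0 (by omega) (by omega),
          PySem.List.pyGetD_eq_getElem t 0 (by omega) (by omega)]
      simp only [Int.toNat_natCast, show ((i : Int) + 1).toNat = i + 1 from by omega]
      exact hcond
  · have hik : i + (k - 1) = j := by omega
    have : (s.length : Int) = (k : Int) := by omega
    omega

-- B-side window gives a valid subset: window ⇒ subset
lemma pvDirBA (arr : List Int) : ∀ w ∈ pvCandB arr, ∃ v ∈ pvCandA arr, w ≤ v := by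
  intro w hw
  unfold pvCandB at hw
  obtain ⟨j, hj, hw2⟩ := List.mem_flatMap.mp hw
  obtain ⟨i, hi, rfl⟩ := List.mem_map.mp hw2
  obtain ⟨hirange, hicond⟩ := List.mem_filter.mp hi
  obtain ⟨hj2, hjlen⟩ := PySem.List.mem_pyRange_one.mp hj
  obtain ⟨hi0, hilt⟩ := PySem.List.mem_pyRange_one.mp hirange
  set t := PySem.List.sorted arr (fun x => x) with htdef
  have hpt : t.Pairwise (· ≤ ·) := PySem.List.sorted_pairwise arr (fun x => x)
  have htp : t.Perm arr := PySem.List.sorted_perm arr (fun x => x) false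
  set jn := j.toNat with hjndef
  set in_ := i.toNat with hindef
  have hjn : jn < t.length := by omega
  have hin2 : in_ + 2 ≤ jn := by omega
  set u := (t.drop in_).take (jn - in_ + 1) with hudef
  have hlenu : u.length = jn - in_ + 1 := by
    rw [hudef]; simp; omega
  have hsubu : u.Sublist t := (List.take_sublist _ _).trans (List.drop_sublist _ _)
  have hpu : u.Pairwise (· ≤ ·) := List.Pairwise.sublist hsubu hpt
  have hgetu : ∀ (m : Nat) (hm : m < u.length), u[m]'hm = t[in_ + m]'(by omega) := by
    intro m hm
    rw [List.getElem_of_eq hudef hm, List.getElem_take, List.getElem_drop]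
  have hcond : t[in_]'(by omega) + t[in_+1]'(by omega) > t[jn]'hjn := by
    unfold pvCondB at hicond
    rw [decide_eq_true_eq] at hicond
    rw [PySem.List.pyGetD_eq_getElem t 0 (by omega) (by omega),
        PySem.List.pyGetD_eq_getElem t 0 (by omega) (by omega),
        PySem.List.pyGetD_eq_getElem t 0 (by omega) (by omega)] at hicond
    simp only [show (i + 1).toNat = in_ + 1 from by omega] at hicond
    exact hicond
  have hvalu : pvValid u = true := by
    refine pvValid_of_sorted u hpu (by omega) ?_
    rw [hgetu 0 (by omega), hgetu 1 (by omega), hgetu (u.length - 1) (by omega)]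
    simp only [hlenu, show in_ + (jn - in_ + 1 - 1) = jn from by omega]
    simpa using hcond
  have hsp : u.Subperm arr := hsubu.subperm.trans htp.subperm
  obtain ⟨s, hsperm, hssub⟩ := hsp
  have hslen : s.length = u.length := hsperm.length_eq
  have hvals : pvValid s = true := (pvValid_perm s u hsperm).mpr hvalu
  refine ⟨(s.length : Int), ?_, ?_⟩
  · unfold pvCandA
    refine List.mem_flatMap.mpr ⟨(s.length : Int),
      PySem.List.mem_pyRange_one.mpr ⟨by omega, by have := hssub.length_le; omega⟩, ?_⟩
    refine List.mem_map.mpr ⟨s, List.mem_filter.mpr ⟨?_, hvals⟩, rfl⟩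
    exact (PySem.List.mem_combinations_iff _ _ _).mpr ⟨hssub, by omega⟩
  · omega

-- ===== VERDICT (by name: the statement is the Claim_ definition above) =====
theorem max_non_consecutive_triangle_subsequence_spec : Claim_equal_max_non_consecutive_triangle_subsequence := by
  intro arr _
  unfold Spec_max_non_consecutive_triangle_subsequence
  rw [pvA_eq, pvB_eq]
  exact le_antisymm (pvFoldMaxLe _ _ (pvDirAB arr)) (pvFoldMaxLe _ _ (pvDirBA arr))
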